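-- pv_equiv track=rewrite | github.com/SSAFYnity/Job-Preparation-Challenge-6th | Programmers/택배상자/택배상자_박단비.py | solution
-- ===== SOURCE A (Python) =====
-- def solution(order):
--     answer = 0
--     stack = []
--     l = len(order)
--     idx = 0
--     num = 0
--
--     while idx < l:
--         if order[idx] > num:
--             num += 1
--             stack.append(num)
--         elif order[idx] == stack[-1]:
--             stack.pop()
--             idx += 1
--         else:
--             return idx
--
--     return idx
--     return answer
-- ===== SOURCE B (Python) =====
-- def solution(order):
--     delivered = set()
--     num = 0   # largest box number pulled from the belt so far
--     top = 0   # largest undelivered box number <= num (0 when every such box is delivered)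
--     for i, x in enumerate(order):
--         if x > num:
--             num = x
--             top = x
--         elif x != top:
--             return i
--         delivered.add(x)
--         while top > 0 and top in delivered:
--             top -= 1
--     return len(order)
-- ===== Notes on version B (the rewrite author's own statement) =====
-- stated objective: alternative
-- what changed: A simulates the conveyor with an explicit stack (a flat while-loop with pointers idx/num, pushing one box per iteration and popping on match); B keeps no stack at all: it maintains a delivered SET plus a downward-moving pointer 'top' (the largest undelivered box number so far), recomputing the would-be stack top by decrementing the pointer past delivered values.
-- outside the precondition, e.g. on solution([3, 1, 2, 2]): A returns 1, B returns 1
import Mathlib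
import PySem

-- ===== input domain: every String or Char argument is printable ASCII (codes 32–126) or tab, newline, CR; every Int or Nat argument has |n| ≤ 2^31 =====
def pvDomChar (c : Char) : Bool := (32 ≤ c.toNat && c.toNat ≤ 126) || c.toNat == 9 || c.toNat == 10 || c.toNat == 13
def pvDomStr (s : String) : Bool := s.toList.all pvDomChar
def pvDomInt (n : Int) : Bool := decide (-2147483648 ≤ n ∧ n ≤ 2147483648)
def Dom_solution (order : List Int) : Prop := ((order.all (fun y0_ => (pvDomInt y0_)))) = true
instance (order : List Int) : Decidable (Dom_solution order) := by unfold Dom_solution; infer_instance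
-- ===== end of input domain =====

-- B replaces A's explicit stack by a delivered-SET plus a downward-moving pointer 'top' (the largest
-- undelivered box number so far): no stack is materialised at all (objective: alternative, no speed claim).
-- Equivalence is about the RETURN value only (neither version mutates its argument).

-- ===== PORT A =====
-- A's stack is kept with its TOP AT THE HEAD: Python's stack.append(v) is v :: stack,
-- stack[-1] is the head, stack.pop() drops the head.  The unused 'answer = 0' and the
-- unreachable final 'return answer' of A are dead code and carry no state.
def solLoopA (order : List Int) (idx num : Int) (stack : List Int) : Int :=
  if _h : idx < (order.length : Int) then
    if PySem.List.pyGetD order idx 0 > num then       -- order[idx] > num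
      solLoopA order idx (num + 1) ((num + 1) :: stack)
    else
      match stack with
      | [] => 0          -- Python raises IndexError on stack[-1] here; excluded by Pre_solution
      | t :: rest => if PySem.List.pyGetD order idx 0 = t
                     then solLoopA order (idx + 1) num rest
                     else idx
  else idx
termination_by (((order.length : Int) - idx).toNat, (PySem.List.pyGetD order idx 0 - num).toNat)
decreasing_by
  · apply Prod.Lex.right; omega
  · apply Prod.Lex.left; omega

def solution (order : List Int) : Int :=
  solLoopA order 0 0 []

-- ===== PORT B =====
-- Source B's inner 'while top > 0 and top in delivered: top -= 1'
def skipB (delivered : PySem.Set Int) (top : Int) : Int :=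
  if _h : 0 < top ∧ PySem.Set.contains delivered top then skipB delivered (top - 1) else top
termination_by top.toNat
decreasing_by omega

-- Source B's for-loop over (i, x) = enumerate(order); state: delivered set, num, top
def solLoopB (i : Nat) (delivered : PySem.Set Int) (num top : Int) (rest : List Int) : Int :=
  match rest with
  | [] => (i : Int)                                   -- loop finished: return len(order)
  | x :: r =>
    if x > num then
      let d' := PySem.Set.add delivered x
      solLoopB (i + 1) d' x (skipB d' x) r
    else if x ≠ top then (i : Int)
    else
      let d' := PySem.Set.add delivered x
      solLoopB (i + 1) d' num (skipB d' top) r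

def solution_alt (order : List Int) : Int :=
  solLoopB 0 PySem.Set.empty 0 0 order

-- ===== PRECONDITION & SPEC =====
-- the list [1, 2, …, n] : List Int
def intRange (n : Nat) : List Int := PySem.List.pyRange 1 ((n : Int) + 1)

-- Pre_ excludes the lists having a prefix that is a permutation of {1,…,i} followed by an element
-- ≤ i: on those A's empty-stack 'stack[-1]' raises IndexError (except for a few such lists on which
-- A already returned at an earlier mismatch, which are excluded conservatively).
def Pre_solution (order : List Int) : Prop :=
  ∀ i < order.length, ¬ ((order.take i).Perm (intRange i) ∧ order.getD i 0 ≤ (i : Int))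
instance (order : List Int) : Decidable (Pre_solution order) := by unfold Pre_solution; infer_instance

def pvWitness_solution : List Int := [2, 1, 3]

def Spec_solution (order : List Int) (out : Int) : Prop := out = solution_alt order
instance (order : List Int) (out : Int) : Decidable (Spec_solution order out) := by unfold Spec_solution; infer_instance

-- ===== CLAIM (what is proved, stated in full; the proofs are below) =====
def Claim_equal_solution : Prop := ∀ (order : List Int), Dom_solution order → Pre_solution order → Spec_solution order (solution order)

-- ===== LEMMAS AND PROOFS =====

lemma intRange_length (n : Nat) : (intRange n).length = n := by
  simp [intRange, PySem.List.length_pyRange_one]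

lemma mem_intRange (n : Nat) (v : Int) : v ∈ intRange n ↔ 1 ≤ v ∧ v ≤ (n : Int) := by
  rw [intRange, PySem.List.mem_pyRange_one]
  omega

lemma intRange_nodup (n : Nat) : (intRange n).Nodup := by
  rw [intRange]; exact PySem.List.nodup_pyRange_one _ _

-- A's inner pushing phase: from (num, stack) with order[idx] = num + n (n ≥ 1) it pushes
-- num+1, …, num+n one at a time.
lemma pushRange_spec (order : List Int) (idx : Int) :
    ∀ (n : Nat) (num : Int) (stack : List Int),
      idx < (order.length : Int) →
      PySem.List.pyGetD order idx 0 = num + (n : Int) → 0 < n →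
      solLoopA order idx num stack =
        solLoopA order idx (num + (n : Int))
          ((PySem.List.pyRange (num + 1) (num + (n : Int) + 1)).reverse ++ stack) := by
  intro n
  induction n with
  | zero => intro num stack _ _ h; omega
  | succ k ih =>
    intro num stack hlt hx _
    rw [solLoopA.eq_def]
    rw [dif_pos hlt, if_pos (by rw [hx]; push_cast; omega)]
    rcases Nat.eq_zero_or_pos k with hk | hk
    · subst hk
      rw [PySem.List.pyRange_one_cons (by omega), PySem.List.pyRange_one_eq_nil (by omega)]
      norm_num
    · rw [ih (num + 1) ((num + 1) :: stack) hlt (by rw [hx]; push_cast; ring) hk]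
      rw [PySem.List.pyRange_one_cons (a := num + 1) (b := num + (((k : Nat) + 1 : Nat) : Int) + 1) (by push_cast; omega)]
      push_cast
      ring_nf
      simp [List.append_assoc]

-- top of the freshly pushed run: reverse of [num+1 .. x] starts with x
lemma pyRange_reverse_head (num x : Int) (h : num < x) :
    (PySem.List.pyRange (num + 1) (x + 1)).reverse =
      x :: (PySem.List.pyRange (num + 1) x).reverse := by
  rw [PySem.List.pyRange_one_succ_right (by omega)]
  simp

-- the skip loop lands exactly on the prescribed value h
lemma skipB_eq (d : PySem.Set Int) (h : Int)
    (hstop : h = 0 ∨ (0 < h ∧ h ∉ d)) :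
    ∀ (n : Nat) (t : Int), t = h + (n : Int) → (∀ v, h < v → v ≤ t → v ∈ d) →
      skipB d t = h := by
  intro n
  induction n with
  | zero =>
    intro t ht _
    have ht' : t = h := by omega
    subst ht'
    rw [skipB]
    rw [dif_neg]
    rcases hstop with h' | h'
    · intro ⟨hc, _⟩; omega
    · intro ⟨_, hc⟩
      exact h'.2 ((PySem.Set.contains_iff d t).1 hc)
  | succ k ih =>
    intro t ht hall
    have h0 : 0 ≤ h := by rcases hstop with h' | h' <;> omega
    have htmem : t ∈ d := hall t (by omega) le_rfl
    rw [skipB, dif_pos ⟨by omega, (PySem.Set.contains_iff d t).2 htmem⟩]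
    exact ih (t - 1) (by omega) (fun v hv1 hv2 => hall v hv1 (by omega))

-- the joint loop invariant relating A's stack to B's (delivered, top)
def LoopInv (done stack : List Int) (num : Int) (delivered : PySem.Set Int) (top : Int) : Prop :=
  0 ≤ num ∧
  stack.Pairwise (· > ·) ∧
  (∀ v ∈ stack, 1 ≤ v ∧ v ≤ num) ∧
  done.Nodup ∧
  (∀ v ∈ done, 1 ≤ v ∧ v ≤ num) ∧
  (∀ v : Int, 1 ≤ v → v ≤ num → (v ∈ done ↔ v ∉ stack)) ∧
  (∀ v : Int, v ∈ delivered ↔ v ∈ done) ∧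
  top = stack.headD 0

lemma mainLoop (order : List Int) (hpre : Pre_solution order) :
    ∀ (rest done stack : List Int) (num : Int) (delivered : PySem.Set Int) (top : Int),
      done ++ rest = order →
      LoopInv done stack num delivered top →
      solLoopA order (done.length : Int) num stack = solLoopB done.length delivered num top rest := by
  intro rest
  induction rest with
  | nil =>
    intro done stack num delivered top hord _
    rw [solLoopA.eq_def, dif_neg (by subst hord; simp)]
    rfl
  | cons x r ih =>
    intro done stack num delivered top hord hinv
    obtain ⟨h0, hpw, hstk, hnd, hdone, hiff, hdel, htop⟩ := hinv
    have hlen : done.length < order.length := by subst hord; simp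
    have hlen' : (done.length : Int) < (order.length : Int) := by exact_mod_cast hlen
    have hidx : PySem.List.pyGetD order (done.length : Int) 0 = x := by
      subst hord; rw [PySem.List.pyGetD_natCast]; simp [List.getD]
    by_cases hgt : num < x
    · -- ===== push branch =====
      have hx1 : 1 ≤ x := by omega
      have hxdone : x ∉ done := fun hx => by have := (hdone x hx).2; omega
      -- A side: bulk-push then pop x
      rw [pushRange_spec order (done.length : Int) (x - num).toNat num stack hlen'
            (by rw [hidx]; omega) (by omega),
          show num + (((x - num).toNat : Nat) : Int) = x by omega,
          pyRange_reverse_head num x hgt]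
      rw [solLoopA.eq_def, dif_pos hlen']
      rw [if_neg (by rw [hidx]; omega)]
      simp only [List.cons_append]
      rw [if_pos hidx]
      -- B side takes one step
      have hB : solLoopB done.length delivered num top (x :: r) =
          solLoopB (done.length + 1) (PySem.Set.add delivered x) x
            (skipB (PySem.Set.add delivered x) x) r := by
        simp only [solLoopB]
        rw [if_pos hgt]
      rw [hB]
      -- names for the new states
      set d' := PySem.Set.add delivered x with hd'
      set stack2 := (PySem.List.pyRange (num + 1) x).reverse ++ stack with hstack2
      have hmemd' : ∀ v : Int, v ∈ d' ↔ v ∈ delivered ∨ v = x := by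
        intro v; rw [hd']; exact PySem.Set.mem_add delivered x v
      have hmem2 : ∀ v : Int, v ∈ stack2 ↔ (num + 1 ≤ v ∧ v < x) ∨ v ∈ stack := by
        intro v
        rw [hstack2]
        simp [PySem.List.mem_pyRange_one]
      -- the skip loop lands on the new stack top
      have hskip : skipB d' x = stack2.headD 0 := by
        by_cases hx2 : num + 1 < x
        · have : stack2 = (x - 1) :: ((PySem.List.pyRange (num + 1) (x - 1)).reverse ++ stack) := by
            rw [hstack2, show x = (x - 1) + 1 by ring, pyRange_reverse_head num (x - 1) (by omega)]
            simp [List.cons_append]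
          rw [this]
          refine skipB_eq d' (x - 1) (Or.inr ⟨by omega, ?_⟩) 1 x (by push_cast; ring) ?_
          · intro hmem
            rcases (hmemd' (x - 1)).1 hmem with hv | hv
            · have := (hdone _ ((hdel _).1 hv)).2; omega
            · omega
          · intro v hv1 hv2
            have : v = x := by omega
            exact (hmemd' v).2 (Or.inr this)
        · have hxn : x = num + 1 := by omega
          have hnil : PySem.List.pyRange (num + 1) x = [] :=
            PySem.List.pyRange_one_eq_nil (by omega)
          have hs2 : stack2 = stack := by rw [hstack2, hnil]; simp
          rw [hs2]
          have hstop : stack.headD 0 = 0 ∨ (0 < stack.headD 0 ∧ stack.headD 0 ∉ d') := by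
            cases stack with
            | nil => exact Or.inl rfl
            | cons t s =>
              refine Or.inr ⟨by have := (hstk t (by simp)).1; simpa using (by omega : (0:Int) < t), ?_⟩
              intro hmem
              have ht1 := hstk t (by simp)
              rcases (hmemd' _).1 hmem with hv | hv
              · have : (t : Int) ∈ done := (hdel _).1 hv
                exact ((hiff t (by simpa using ht1.1) (by simpa using ht1.2)).1 this) (by simp)
              · simp at hv; omega
          have hub : stack.headD 0 ≤ x := by
            cases stack with
            | nil => simpa using (by omega : (0:Int) ≤ x)
            | cons t s => have := (hstk t (by simp)).2; simpa using (by omega : t ≤ x)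
          refine skipB_eq d' (stack.headD 0) hstop (x - stack.headD 0).toNat x (by omega) ?_
          intro v hv1 hv2
          rcases eq_or_lt_of_le hv2 with hvx | hvx
          · exact (hmemd' v).2 (Or.inr hvx)
          · -- stack.headD 0 < v ≤ num : delivered already
            have hvnum : v ≤ num := by omega
            have hv1' : 1 ≤ v := by
              cases stack with
              | nil => simpa using (by simp at hv1; omega : (1:Int) ≤ v)
              | cons t s => have := (hstk t (by simp)).1; simp at hv1; omega
            have hvnotstack : v ∉ stack := by
              cases stack with
              | nil => simp
              | cons t s =>
                simp only [List.headD_cons] at hv1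
                intro hvmem
                rcases List.mem_cons.1 hvmem with h | h
                · omega
                · have := List.rel_of_pairwise_cons hpw h
                  omega
            exact (hmemd' v).2 (Or.inl ((hdel v).2 ((hiff v hv1' hvnum).2 hvnotstack)))
      rw [hskip]
      -- invariant for the new state
      have hinv2 : LoopInv (done ++ [x]) stack2 x d' (stack2.headD 0) := by
        refine ⟨by omega, ?_, ?_, ?_, ?_, ?_, ?_, rfl⟩
        · rw [hstack2]
          refine List.pairwise_append.2 ⟨?_, hpw, ?_⟩
          · rw [List.pairwise_reverse]
            exact (PySem.List.pairwise_lt_pyRange_one (num + 1) x).imp (fun h => h)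
          · intro a ha b hb
            have ha' : num + 1 ≤ a ∧ a < x := by
              rw [List.mem_reverse, PySem.List.mem_pyRange_one] at ha; exact ha
            have := (hstk b hb).2
            omega
        · intro v hv
          rcases (hmem2 v).1 hv with h | h
          · omega
          · have := hstk v h; omega
        · exact hnd.append (List.nodup_singleton x)
            (fun a ha hax => hxdone ((List.mem_singleton.1 hax) ▸ ha))
        · intro v hv
          rcases List.mem_append.1 hv with h | h
          · have := hdone v h; omega
          · simp at h; omega
        · intro v hv1 hv2
          rw [List.mem_append, List.mem_singleton, hmem2]
          by_cases hvn : v ≤ num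
          · have hvx : v ≠ x := by omega
            rw [hiff v hv1 hvn]
            constructor
            · rintro (h | h)
              · intro hc; rcases hc with hc | hc
                · omega
                · exact h hc
              · omega
            · intro h
              exact Or.inl (fun hc => h (Or.inr hc))
          · by_cases hvx : v = x
            · subst hvx
              constructor
              · intro _ hc
                rcases hc with hc | hc
                · omega
                · have := (hstk _ hc).2; omega
              · intro _; exact Or.inr rfl
            · -- num < v < x : on the freshly pushed part
              have hvin : num + 1 ≤ v ∧ v < x := by omega
              constructor
              · rintro (h | h)
                · have := (hdone v h).2; omega
                · omega
              · intro h; exact absurd (Or.inl hvin) h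
        · intro v
          rw [hmemd', List.mem_append, List.mem_singleton, hdel]
      have hlen2 : ((done ++ [x]).length : Int) = (done.length : Int) + 1 := by simp
      have := ih (done ++ [x]) stack2 x d' (stack2.headD 0) (by simpa using hord) hinv2
      rw [hlen2] at this
      simpa using this
    · -- ===== x ≤ num : pop or mismatch =====
      cases stack with
      | nil =>
        -- A's Python raises IndexError here; impossible under Pre_solution
        exfalso
        have hperm : done.Perm (intRange num.toNat) := by
          refine (List.perm_ext_iff_of_nodup hnd (intRange_nodup _)).2 ?_
          intro v
          rw [mem_intRange]
          constructor
          · intro hv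
            have := hdone v hv
            omega
          · intro hv
            exact (hiff v (by omega) (by omega)).2 (by simp)
        have hdl : (done.length : Int) = num := by
          have := hperm.length_eq
          rw [intRange_length] at this
          omega
        refine hpre done.length hlen ⟨?_, ?_⟩
        · rw [← hord, List.take_left]
          have : num.toNat = done.length := by omega
          rwa [this] at hperm
        · have hg : order.getD done.length 0 = x := by
            rw [← PySem.List.pyGetD_natCast order done.length 0]; exact hidx
          rw [hg]; omega
      | cons t s =>
        have htop' : top = t := by simpa using htop
        have ht1 : 1 ≤ t := (hstk t (by simp)).1
        have htn : t ≤ num := (hstk t (by simp)).2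
        have hA : solLoopA order (done.length : Int) num (t :: s) =
            if x = t then solLoopA order ((done.length : Int) + 1) num s else (done.length : Int) := by
          rw [solLoopA.eq_def, dif_pos hlen', if_neg (by rw [hidx]; omega)]
          show (if PySem.List.pyGetD order ((done.length : Int)) 0 = t
                then solLoopA order ((done.length : Int) + 1) num s
                else ((done.length : Int))) = _
          rw [hidx]
        rw [hA]
        have hB : solLoopB done.length delivered num top (x :: r) =
            if x ≠ t then (done.length : Int)
            else solLoopB (done.length + 1) (PySem.Set.add delivered x) num
                   (skipB (PySem.Set.add delivered x) t) r := by
          simp only [solLoopB]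
          rw [if_neg (by omega), htop']
        rw [hB]
        by_cases hxt : x = t
        · rw [if_pos hxt, if_neg (by simpa using hxt)]
          subst hxt
          set d' := PySem.Set.add delivered x with hd'
          have hmemd' : ∀ v : Int, v ∈ d' ↔ v ∈ delivered ∨ v = x :=
            fun v => PySem.Set.mem_add delivered x v
          have hxnotdone : x ∉ done := fun hc => (hiff x ht1 htn).1 hc (by simp)
          have hpws : s.Pairwise (· > ·) := (List.pairwise_cons.1 hpw).2
          have hlts : ∀ v ∈ s, v < x := fun v hv => List.rel_of_pairwise_cons hpw hv
          have hskip : skipB d' x = s.headD 0 := by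
            have hstop : s.headD 0 = 0 ∨ (0 < s.headD 0 ∧ s.headD 0 ∉ d') := by
              cases s with
              | nil => exact Or.inl rfl
              | cons u s' =>
                have hu := hstk u (by simp)
                refine Or.inr ⟨by simpa using (by omega : (0:Int) < u), ?_⟩
                intro hmem
                rcases (hmemd' _).1 hmem with hv | hv
                · have : (u : Int) ∈ done := (hdel _).1 hv
                  exact ((hiff u (by simpa using hu.1) (by simpa using hu.2)).1 this) (by simp)
                · have := hlts u (by simp); simp at hv; omega
            have hub : s.headD 0 ≤ x := by
              cases s with
              | nil => simpa using (by omega : (0:Int) ≤ x)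
              | cons u s' => have := hlts u (by simp); simpa using (by omega : u ≤ x)
            refine skipB_eq d' (s.headD 0) hstop (x - s.headD 0).toNat x (by omega) ?_
            intro v hv1 hv2
            rcases eq_or_lt_of_le hv2 with hvx | hvx
            · exact (hmemd' v).2 (Or.inr hvx)
            · have hv1' : 1 ≤ v := by
                cases s with
                | nil => simp at hv1; omega
                | cons u s' => have := (hstk u (by simp [List.mem_cons])).1; simp at hv1; omega
              have hvnotstack : v ∉ x :: s := by
                intro hvmem
                rcases List.mem_cons.1 hvmem with h | h
                · omega
                · cases s with
                  | nil => simp at h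
                  | cons u s' =>
                    simp only [List.headD_cons] at hv1
                    rcases List.mem_cons.1 h with h' | h'
                    · omega
                    · have := List.rel_of_pairwise_cons hpws h'
                      omega
              exact (hmemd' v).2 (Or.inl ((hdel v).2 ((hiff v hv1' (by omega)).2 hvnotstack)))
          rw [hskip]
          have hinv2 : LoopInv (done ++ [x]) s num d' (s.headD 0) := by
            refine ⟨h0, hpws, fun v hv => hstk v (by simp [hv]), ?_, ?_, ?_, ?_, rfl⟩
            · exact hnd.append (List.nodup_singleton x)
                (fun a ha hax => hxnotdone ((List.mem_singleton.1 hax) ▸ ha))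
            · intro v hv
              rcases List.mem_append.1 hv with h | h
              · exact hdone v h
              · simp at h; subst h; exact ⟨ht1, htn⟩
            · intro v hv1 hv2
              rw [List.mem_append, List.mem_singleton]
              by_cases hvx : v = x
              · subst hvx
                constructor
                · intro _ hc
                  exact absurd (hlts _ hc) (lt_irrefl _)
                · intro _; exact Or.inr rfl
              · constructor
                · rintro (h | h) hc
                  · exact (hiff v hv1 hv2).1 h (List.mem_cons_of_mem _ hc)
                  · exact hvx h
                · intro h
                  refine Or.inl ((hiff v hv1 hv2).2 ?_)
                  intro hc
                  rcases List.mem_cons.1 hc with h1 | h1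
                  · exact hvx h1
                  · exact h h1
            · intro v
              rw [hmemd', List.mem_append, List.mem_singleton, hdel]
          have hlen2 : ((done ++ [x]).length : Int) = (done.length : Int) + 1 := by simp
          have := ih (done ++ [x]) s num d' (s.headD 0) (by simpa using hord) hinv2
          rw [hlen2] at this
          simpa using this
        · rw [if_neg hxt, if_pos hxt]

-- ===== VERDICT (by name: the statement is the Claim_ definition above) =====
theorem solution_spec : Claim_equal_solution := by
  intro order _ hpre
  unfold Spec_solution solution solution_alt
  have := mainLoop order hpre order [] [] 0 PySem.Set.empty 0 (by simp)
    ⟨le_rfl, List.Pairwise.nil, by simp, List.nodup_nil, by simp,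
     by intro v h1 h2; omega, by simp [PySem.Set.empty], rfl⟩
  simpa using this
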